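-- pv_equiv track=rewrite | github.com/guige2023/rabai_autoclick | actions/chunker_action.py | rolling
-- ===== SOURCE A (Python) =====
-- from collections import deque
-- from typing import Any, Callable, Generic, Iterable, Iterator, List, Optional, Sequence, TypeVar, Union
--
-- T = TypeVar("T")
--
-- def rolling(
--     data: Iterable[T],
--     size: int,
--     fill: Optional[T] = None,
-- ) -> Iterator[List[T]]:
--     """Rolling window with optional fill value.
--
--     Args:
--         data: Input iterable.
--         size: Window size.
--         fill: Value to use for incomplete windows.
--
--     Yields:
--         Windows of size elements.
--     """
--     d = deque(maxlen=size)
--     sentinel_added = False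
--     if fill is not None and size > 0:
--         d.extend([fill] * (size - 1))
--     for item in data:
--         d.append(item)
--         yield list(d)
--     if fill is not None:
--         sentinel_added = True
-- ===== SOURCE B (Python) =====
-- def rolling(data, size, fill=None):
--     """Rolling window by list slicing over a materialized (finite) input."""
--     items = list(data)
--     if fill is not None and size > 0:
--         padded = [fill] * (size - 1) + items
--         for i in range(len(items)):
--             yield padded[i:i + size]
--     else:
--         for i in range(len(items)):
--             yield items[max(0, i - size + 1):i + 1]
-- ===== Notes on version B (the rewrite author's own statement) =====
-- stated objective: alternative
-- what changed: Replaces the stateful deque (mutable rolling buffer updated per element) with a stateless slicing formulation: materialize the input, prepend size-1 fill elements when applicable, and compute each window directly as a list slice by index.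
import Mathlib
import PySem

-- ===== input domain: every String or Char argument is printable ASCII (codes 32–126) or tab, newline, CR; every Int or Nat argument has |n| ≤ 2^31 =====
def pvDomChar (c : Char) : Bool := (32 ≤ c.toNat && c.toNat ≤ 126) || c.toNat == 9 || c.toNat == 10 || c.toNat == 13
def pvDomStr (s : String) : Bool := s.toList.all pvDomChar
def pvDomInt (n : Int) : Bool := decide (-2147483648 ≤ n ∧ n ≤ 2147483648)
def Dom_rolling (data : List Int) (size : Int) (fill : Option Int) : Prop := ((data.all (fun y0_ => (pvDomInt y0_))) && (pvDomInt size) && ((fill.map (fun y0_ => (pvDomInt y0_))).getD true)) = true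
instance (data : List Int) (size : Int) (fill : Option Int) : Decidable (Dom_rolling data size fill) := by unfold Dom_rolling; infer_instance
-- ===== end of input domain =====

-- B replaces A's stateful bounded deque with stateless list slicing (pad then slice);
-- equivalence is about the list of yielded windows of the finite input (generators fully consumed).

-- ===== PORT A =====
-- d.append(item) on a deque with maxlen n: drop from the left if the length would exceed n
def rollStep (n : Nat) (st : List Int × List (List Int)) (x : Int) : List Int × List (List Int) :=
  let d := st.1 ++ [x]
  let d := if n < d.length then d.drop (d.length - n) else d
  (d, st.2 ++ [d])

def rolling (data : List Int) (size : Int) (fill : Option Int) : List (List Int) :=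
  let n := size.toNat
  let init : List Int :=
    match fill with
    | some f => if 0 < size then List.replicate (n - 1) f else []
    | none => []
  (data.foldl (rollStep n) (init, [])).2

-- ===== PORT B =====
def rolling_alt (data : List Int) (size : Int) (fill : Option Int) : List (List Int) :=
  match fill with
  | some f =>
    if 0 < size then
      let padded := List.replicate (size.toNat - 1) f ++ data
      (List.range data.length).map (fun (i : Nat) => PySem.List.slice padded (some (i : Int)) (some ((i : Int) + size)))
    else
      (List.range data.length).map (fun (i : Nat) => PySem.List.slice data (some (max 0 ((i : Int) - size + 1))) (some ((i : Int) + 1)))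
  | none =>
    (List.range data.length).map (fun (i : Nat) => PySem.List.slice data (some (max 0 ((i : Int) - size + 1))) (some ((i : Int) + 1)))

-- ===== PRECONDITION & SPEC =====
-- Pre_ excludes size < 0, on which A raises ValueError ("maxlen must be non-negative") when consumed.
def Pre_rolling (data : List Int) (size : Int) (fill : Option Int) : Prop := 0 ≤ size
instance (data : List Int) (size : Int) (fill : Option Int) : Decidable (Pre_rolling data size fill) := by unfold Pre_rolling; infer_instance
def pvWitness_rolling : List Int × Int × Option Int := ([1, 2, 3], 2, some 0)

def Spec_rolling (data : List Int) (size : Int) (fill : Option Int) (out : List (List Int)) : Prop := out = rolling_alt data size fill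
instance (data : List Int) (size : Int) (fill : Option Int) (out : List (List Int)) : Decidable (Spec_rolling data size fill out) := by unfold Spec_rolling; infer_instance

-- ===== CLAIM (what is proved, stated in full; the proofs are below) =====
def Claim_equal_rolling : Prop := ∀ (data : List Int) (size : Int) (fill : Option Int), Dom_rolling data size fill → Pre_rolling data size fill → Spec_rolling data size fill (rolling data size fill)

-- ===== LEMMAS AND PROOFS =====

-- the last n elements of a list
def lastN (n : Nat) (xs : List Int) : List Int := xs.drop (xs.length - n)

theorem rollStep_eq (n : Nat) (st : List Int × List (List Int)) (x : Int) :
    rollStep n st x = (lastN n (st.1 ++ [x]), st.2 ++ [lastN n (st.1 ++ [x])]) := by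
  simp only [rollStep, lastN]
  split
  · rfl
  · rw [Nat.sub_eq_zero_of_le (by omega : (st.1 ++ [x]).length ≤ n), List.drop_zero]

theorem lastN_append_lastN (n : Nat) (y z : List Int) :
    lastN n (lastN n y ++ z) = lastN n (y ++ z) := by
  unfold lastN
  rw [List.drop_append, List.drop_drop, List.drop_append (l₁ := y) (l₂ := z)]
  congr 1
  · congr 1
    simp only [List.length_append, List.length_drop]
    omega
  · congr 1
    simp only [List.length_append, List.length_drop]
    omega

theorem foldl_rollStep (n : Nat) (l : List Int) :
    ∀ (d : List Int) (acc : List (List Int)),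
      (l.foldl (rollStep n) (d, acc)).2 =
        acc ++ (List.range l.length).map (fun i => lastN n (d ++ l.take (i + 1))) := by
  induction l with
  | nil => intro d acc; simp
  | cons x l ih =>
    intro d acc
    rw [List.foldl_cons, rollStep_eq]
    rw [ih]
    simp only [List.length_cons, List.range_succ_eq_map, List.map_cons, List.map_map,
      List.take_succ_cons, List.take_zero, List.append_assoc, List.singleton_append]
    congr 1
    congr 1
    apply List.map_congr_left
    intro i _
    simp only [Function.comp]
    rw [show d ++ x :: l.take (i + 1) = (d ++ [x]) ++ l.take (i + 1) by simp]
    exact lastN_append_lastN n (d ++ [x]) (l.take (i + 1))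

-- fill branch: the window at index i is padded[i : i+n]
theorem fill_window (n : Nat) (hn : 0 < n) (f : Int) (data : List Int) (i : Nat)
    (hi : i < data.length) :
    lastN n (List.replicate (n - 1) f ++ data.take (i + 1)) =
      ((List.replicate (n - 1) f ++ data).take (n + i)).drop i := by
  have htk : (List.replicate (n - 1) f ++ data).take (n + i) =
      List.replicate (n - 1) f ++ data.take (i + 1) := by
    rw [List.take_append]
    congr 1
    · exact List.take_of_length_le (by simp; omega)
    · congr 1
      simp only [List.length_replicate]
      omega
  rw [htk]
  unfold lastN
  congr 1
  simp only [List.length_append, List.length_replicate, List.length_take]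
  omega

theorem rolling_eq_fill (data : List Int) (size : Int) (f : Int) (hs : 0 < size) :
    rolling data size (some f) = rolling_alt data size (some f) := by
  unfold rolling rolling_alt
  simp only [hs, if_pos]
  rw [foldl_rollStep]
  simp only [List.nil_append]
  apply List.map_congr_left
  intro i hi
  rw [List.mem_range] at hi
  rw [show ((i : Int) + size) = ((i : Int) + (size.toNat : Int)) by omega,
      PySem.List.slice_natCast_add]
  rw [fill_window size.toNat (by omega) f data i hi]
  rw [List.drop_take]
  congr 1
  omega

theorem rolling_eq_nofill (data : List Int) (size : Int) (hs : 0 ≤ size) (i : Nat)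
    (hi : i < data.length) :
    lastN size.toNat (data.take (i + 1)) =
      PySem.List.slice data (some (max 0 ((i : Int) - size + 1))) (some ((i : Int) + 1)) := by
  have hmax : max 0 ((i : Int) - size + 1) = (((i + 1 - size.toNat : Nat) : Nat) : Int) := by
    omega
  rw [hmax, show ((i : Int) + 1) = (((i + 1 : Nat) : Nat) : Int) by omega,
      PySem.List.slice_natCast]
  unfold lastN
  rw [List.drop_take]
  congr 1 <;> simp <;> omega

-- ===== VERDICT (by name: the statement is the Claim_ definition above) =====
theorem rolling_spec : Claim_equal_rolling := by
  intro data size fill _ hpre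
  unfold Spec_rolling
  have hs : 0 ≤ size := hpre
  match fill with
  | some f =>
    rcases Int.lt_or_le 0 size with hpos | hnp
    · exact rolling_eq_fill data size f hpos
    · have hz : size = 0 := le_antisymm hnp hs
      subst hz
      unfold rolling rolling_alt
      simp only [lt_irrefl, if_false]
      rw [foldl_rollStep]
      simp only [List.nil_append]
      apply List.map_congr_left
      intro i hi
      rw [List.mem_range] at hi
      exact rolling_eq_nofill data 0 le_rfl i hi
  | none =>
    unfold rolling rolling_alt
    rw [foldl_rollStep]
    simp only [List.nil_append]
    apply List.map_congr_left
    intro i hi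
    rw [List.mem_range] at hi
    exact rolling_eq_nofill data size hs i hi
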